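-- pv_equiv track=rewrite | github.com/Hydra-Laboratories/PANDA_CORE | src/labware/deck/loader.py | _row_labels
-- ===== SOURCE A (Python) =====
-- def _row_labels(rows: int) -> list[str]:
--     if rows <= 0:
--         raise ValueError("rows must be positive for row label generation.")
--     labels: list[str] = []
--     for index in range(rows):
--         label = ""
--         value = index + 1
--         while value > 0:
--             value, remainder = divmod(value - 1, 26)
--             label = chr(65 + remainder) + label
--         labels.append(label)
--     return labels
-- ===== SOURCE B (Python) =====
-- def _row_labels(rows: int) -> list[str]:
--     if rows <= 0:
--         raise ValueError("rows must be positive for row label generation.")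
--     labels: list[str] = []
--     digits: list[str] = []  # least-significant character first (odometer state)
--     for _ in range(rows):
--         # increment the odometer, carrying past 'Z'
--         i = 0
--         while i < len(digits) and digits[i] == "Z":
--             digits[i] = "A"
--             i += 1
--         if i == len(digits):
--             digits.append("A")
--         else:
--             digits[i] = chr(ord(digits[i]) + 1)
--         labels.append("".join(reversed(digits)))
--     return labels
-- ===== Notes on version B (the rewrite author's own statement) =====
-- stated objective: alternative
-- what changed: B maintains one odometer (least-significant-first digit list) incremented with explicit carry per row, instead of A's independent divmod base-26 conversion for every index.
-- outside the precondition, e.g. on _row_labels(0): A raises ValueError, B raises ValueError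
import Mathlib
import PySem

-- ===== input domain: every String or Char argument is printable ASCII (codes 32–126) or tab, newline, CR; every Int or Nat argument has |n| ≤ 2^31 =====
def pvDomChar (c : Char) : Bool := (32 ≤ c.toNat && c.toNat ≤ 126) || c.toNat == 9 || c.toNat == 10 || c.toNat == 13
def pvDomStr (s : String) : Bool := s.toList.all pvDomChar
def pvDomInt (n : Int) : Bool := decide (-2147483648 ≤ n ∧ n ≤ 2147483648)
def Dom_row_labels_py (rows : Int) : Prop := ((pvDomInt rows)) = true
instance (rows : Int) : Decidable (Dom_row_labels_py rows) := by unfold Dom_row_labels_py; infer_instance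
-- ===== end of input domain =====

-- B maintains one odometer (LSD-first digit list) incremented with explicit carry per row,
-- instead of A's independent base-26 divmod conversion for every index. Objective: alternative.

-- ===== PORT A =====
-- inner 'while value > 0' loop of A: prepends chr(65+remainder) to label each step
def pvA_loop (value : Int) (label : String) : String :=
  if 0 < value then
    pvA_loop (PySem.Int.floordiv (value - 1) 26)
      (String.ofList [Char.ofNat (65 + (PySem.Int.mod (value - 1) 26)).toNat] ++ label)
  else label
termination_by value.toNat
decreasing_by
  rename_i h
  have h26 : (0:Int) < 26 := by norm_num
  rw [PySem.Int.floordiv_eq_ediv_of_pos h26]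
  have h1 : (value - 1) / 26 ≤ value - 1 := Int.ediv_le_self _ (by omega)
  omega

def row_labels_py (rows : Int) : List String :=
  (PySem.List.pyRange 0 rows 1).foldl
    (fun labels index => labels ++ [pvA_loop (index + 1) ""]) []

-- ===== PORT B =====
-- B's inner while-loop + if: scan the LSD-first digits, turning 'Z' into 'A' while carrying,
-- then either append a fresh 'A' (whole odometer overflowed) or bump the current digit.
def pvB_inc : List Char → List Char
  | [] => ['A']
  | c :: rest => if c = 'Z' then 'A' :: pvB_inc rest else Char.ofNat (c.toNat + 1) :: rest

def row_labels_py_alt (rows : Int) : List String :=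
  ((PySem.List.pyRange 0 rows 1).foldl
      (fun (st : List Char × List String) _ =>
        let d := pvB_inc st.1
        (d, st.2 ++ [String.ofList d.reverse]))
      ([], [])).2

-- ===== PRECONDITION & SPEC =====
-- Python A raises ValueError for rows <= 0; exactly those inputs are excluded.
def Pre_row_labels_py (rows : Int) : Prop := 0 < rows
instance (rows : Int) : Decidable (Pre_row_labels_py rows) := by unfold Pre_row_labels_py; infer_instance
def pvWitness_row_labels_py : Int := (3)

def Spec_row_labels_py (rows : Int) (out : List String) : Prop := out = row_labels_py_alt rows
instance (rows : Int) (out : List String) : Decidable (Spec_row_labels_py rows out) := by unfold Spec_row_labels_py; infer_instance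

-- ===== CLAIM (what is proved, stated in full; the proofs are below) =====
def Claim_equal_row_labels_py : Prop := ∀ (rows : Int), Dom_row_labels_py rows → Pre_row_labels_py rows → Spec_row_labels_py rows (row_labels_py rows)

-- ===== LEMMAS AND PROOFS =====

-- mathematical bijective base-26 label of n (MSD first), the common reference
def specL (n : Nat) : List Char :=
  if _ : n = 0 then [] else specL ((n - 1) / 26) ++ [Char.ofNat (65 + (n - 1) % 26)]
termination_by n
decreasing_by omega

theorem specL_zero : specL 0 = [] := by rw [specL]; simp

theorem specL_succ (n : Nat) : specL (n + 1) = specL (n / 26) ++ [Char.ofNat (65 + n % 26)] := by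
  rw [specL]; simp

theorem toNat_ofNat_small (k : Nat) (h : k < 55296) : (Char.ofNat k).toNat = k := by
  rw [Char.toNat_ofNat]
  simp [Nat.isValidChar, h]

theorem pvA_loop_eq (n : Nat) : ∀ label, pvA_loop (n : Int) label = String.ofList (specL n) ++ label := by
  induction n using Nat.strong_induction_on with
  | _ n ih =>
    intro label
    rcases Nat.eq_zero_or_pos n with h0 | hpos
    · subst h0
      rw [pvA_loop, specL]
      simp
    · rw [pvA_loop, specL]
      have hc : (n : Int) - 1 = ((n - 1 : Nat) : Int) := by omega
      have hd : PySem.Int.floordiv ((n : Int) - 1) 26 = (((n - 1) / 26 : Nat) : Int) := by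
        rw [hc]; exact_mod_cast PySem.Int.floordiv_natCast (n - 1) 26
      have hm : PySem.Int.mod ((n : Int) - 1) 26 = (((n - 1) % 26 : Nat) : Int) := by
        rw [hc]; exact_mod_cast PySem.Int.mod_natCast (n - 1) 26
      simp only [hpos, Int.natCast_pos, if_true, hd, hm]
      rw [ih ((n - 1) / 26) (by omega)]
      have ht : ((65 : Int) + (((n - 1) % 26 : Nat) : Int)).toNat = 65 + (n - 1) % 26 := by omega
      rw [ht, dif_neg hpos.ne', String.ofList_append, String.append_assoc]

theorem pvB_inc_specL (n : Nat) : pvB_inc (specL n).reverse = (specL (n + 1)).reverse := by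
  induction n using Nat.strong_induction_on with
  | _ n ih =>
    rcases Nat.eq_zero_or_pos n with h0 | hpos
    · subst h0
      rw [specL_zero, specL_succ]
      simp [pvB_inc, specL_zero]
    · obtain ⟨m, rfl⟩ : ∃ m, n = m + 1 := ⟨n - 1, by omega⟩
      rw [specL_succ m]
      simp only [List.reverse_append, List.reverse_singleton, List.singleton_append]
      have hm26 : m % 26 < 26 := Nat.mod_lt _ (by norm_num)
      have htc : (Char.ofNat (65 + m % 26)).toNat = 65 + m % 26 := toNat_ofNat_small _ (by omega)
      by_cases hz : m % 26 = 25
      · -- carry case: digit is 'Z'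
        have hcz : Char.ofNat (65 + m % 26) = 'Z' := by rw [hz]
        rw [pvB_inc, hcz, if_pos rfl]
        rw [ih (m / 26) (by omega)]
        have h1 : (m + 1) % 26 = 0 := by omega
        have h2 : (m + 1) / 26 = m / 26 + 1 := by omega
        rw [specL_succ (m + 1), h1, h2]
        simp only [List.reverse_append, List.reverse_singleton, List.singleton_append]
      · -- no carry: bump the digit
        have hcz : Char.ofNat (65 + m % 26) ≠ 'Z' := by
          intro hEq
          have : (Char.ofNat (65 + m % 26)).toNat = 90 := by rw [hEq]; decide
          omega
        rw [pvB_inc, if_neg hcz, htc]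
        have h1 : (m + 1) % 26 = m % 26 + 1 := by omega
        have h2 : (m + 1) / 26 = m / 26 := by omega
        rw [specL_succ (m + 1), h1, h2]
        simp only [List.reverse_append, List.reverse_singleton, List.singleton_append]
        rw [Nat.add_assoc]

-- the common result: first n labels
def pvLabels (n : Nat) : List String := (List.range n).map (fun i => String.ofList (specL (i + 1)))

theorem foldA_eq (n : Nat) (acc : List String) :
    ((List.range n).map (fun (k : Nat) => (k : Int))).foldl
      (fun labels index => labels ++ [pvA_loop (index + 1) ""]) acc = acc ++ pvLabels n := by
  induction n generalizing acc with
  | zero => simp [pvLabels]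
  | succ n ih =>
    rw [List.range_succ, List.map_append, List.foldl_append, ih]
    simp only [List.map_cons, List.map_nil, List.foldl_cons, List.foldl_nil]
    have hc : ((n : Int)) + 1 = ((n + 1 : Nat) : Int) := by omega
    rw [hc, pvA_loop_eq]
    simp [pvLabels, List.range_succ]

theorem foldB_eq (n : Nat) :
    ((List.range n).map (fun (k : Nat) => (k : Int))).foldl
      (fun (st : List Char × List String) _ =>
        let d := pvB_inc st.1
        (d, st.2 ++ [String.ofList d.reverse]))
      ([], []) = ((specL n).reverse, pvLabels n) := by
  induction n with
  | zero => simp [pvLabels, specL_zero]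
  | succ n ih =>
    rw [List.range_succ, List.map_append, List.foldl_append, ih]
    simp only [List.map_cons, List.map_nil, List.foldl_cons, List.foldl_nil]
    rw [pvB_inc_specL]
    simp [pvLabels, List.range_succ]

-- ===== VERDICT (by name: the statement is the Claim_ definition above) =====
theorem row_labels_py_spec : Claim_equal_row_labels_py := by
  intro rows _ _
  unfold Spec_row_labels_py row_labels_py row_labels_py_alt
  rw [PySem.List.pyRange_one]
  simp only [Int.sub_zero, zero_add]
  rw [foldA_eq, foldB_eq]
  simp
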